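-- pv_equiv track=rewrite | github.com/joseph-cchang/Python_Programming_CS9 | Lab 3: Recursion/lab03.py | collectEvenInts
-- ===== SOURCE A (Python) =====
-- def collectEvenInts(listofInt):
--     if len(listofInt) == 0:
--         return []
--     else:
--         if listofInt[0] % 2 == 0:
--             return [listofInt[0]] + collectEvenInts(listofInt[1:])
--         else:
--             return collectEvenInts(listofInt[1:])
-- ===== SOURCE B (Python) =====
-- def collectEvenInts(listofInt):
--     evens = []
--     for x in listofInt:
--         if x % 2 == 0:
--             evens.append(x)
--     return evens
-- ===== Notes on version B (the rewrite author's own statement) =====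
-- stated objective: idiomatic
-- what changed: Replaces A's slice-based linear recursion (rebuilding the tail with listofInt[1:] at every step) with a single iterative pass that appends even elements to an accumulator list.
import Mathlib
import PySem

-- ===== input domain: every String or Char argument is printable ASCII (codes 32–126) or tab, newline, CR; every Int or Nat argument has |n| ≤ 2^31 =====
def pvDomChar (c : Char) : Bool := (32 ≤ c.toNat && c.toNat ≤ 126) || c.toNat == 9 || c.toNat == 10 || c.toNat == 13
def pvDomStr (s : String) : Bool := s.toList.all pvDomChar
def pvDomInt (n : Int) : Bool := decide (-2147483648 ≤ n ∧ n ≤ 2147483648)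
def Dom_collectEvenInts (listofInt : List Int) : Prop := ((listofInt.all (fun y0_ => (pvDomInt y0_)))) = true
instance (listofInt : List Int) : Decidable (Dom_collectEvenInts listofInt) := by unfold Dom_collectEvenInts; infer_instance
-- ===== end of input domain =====

-- B replaces A's slice-based linear recursion with a single iterative accumulator pass (idiomatic; O(n) instead of A's O(n^2) slicing).

-- ===== PORT A =====
-- literal transliteration of A: empty check, head test, recurse on the tail slice
def collectEvenInts (listofInt : List Int) : List Int :=
  match listofInt with
  | [] => []
  | x :: rest =>
    if PySem.Int.mod x 2 = 0 then
      [x] ++ collectEvenInts (PySem.List.slice (x :: rest) (some 1) none)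
    else
      collectEvenInts (PySem.List.slice (x :: rest) (some 1) none)
decreasing_by all_goals simp [PySem.List.slice_from_one]

-- ===== PORT B =====
-- iterative pass: fold over the list, appending evens to the accumulator
def collectEvenInts_alt (listofInt : List Int) : List Int :=
  listofInt.foldl (fun evens x => if PySem.Int.mod x 2 = 0 then evens ++ [x] else evens) []

-- ===== PRECONDITION & SPEC =====
def Spec_collectEvenInts (listofInt : List Int) (out : List Int) : Prop := out = collectEvenInts_alt listofInt
instance (listofInt : List Int) (out : List Int) : Decidable (Spec_collectEvenInts listofInt out) := by unfold Spec_collectEvenInts; infer_instance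

-- ===== CLAIM (what is proved, stated in full; the proofs are below) =====
def Claim_equal_collectEvenInts : Prop := ∀ (listofInt : List Int), Dom_collectEvenInts listofInt → Spec_collectEvenInts listofInt (collectEvenInts listofInt)

-- ===== LEMMAS AND PROOFS =====
theorem collectEvenInts_cons (x : Int) (rest : List Int) :
    collectEvenInts (x :: rest) =
      if PySem.Int.mod x 2 = 0 then x :: collectEvenInts rest else collectEvenInts rest := by
  rw [collectEvenInts]
  simp [PySem.List.slice_from_one]

theorem foldl_acc (l : List Int) (acc : List Int) :
    l.foldl (fun evens x => if PySem.Int.mod x 2 = 0 then evens ++ [x] else evens) acc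
      = acc ++ collectEvenInts l := by
  induction l generalizing acc with
  | nil => simp [collectEvenInts]
  | cons x rest ih =>
    rw [collectEvenInts_cons]
    simp only [List.foldl_cons]
    by_cases h : PySem.Int.mod x 2 = 0
    · rw [if_pos h, if_pos h, ih]; simp
    · rw [if_neg h, if_neg h, ih]

-- ===== VERDICT (by name: the statement is the Claim_ definition above) =====
theorem collectEvenInts_spec : Claim_equal_collectEvenInts := by
  intro l _
  unfold Spec_collectEvenInts collectEvenInts_alt
  rw [foldl_acc]
  simp
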